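-- pv_equiv track=rewrite | github.com/ZrinkaCvitanovic/ID3_Algorithm | solution.py | most_common_y
-- ===== SOURCE A (Python) =====
-- def most_common_y(D):
--     values_y = dict()
--     for d in D:
--         current_y = d[-1]
--         if current_y not in values_y:
--             values_y[current_y] = 0
--         values_y[current_y] += 1
--
--     maximum = 0
--     most_frequent = None
--     y_keys = list(values_y.keys())
--     y_keys.sort()
--     sorted_dict = {i: values_y[i] for i in y_keys}
--     for value, count in sorted_dict.items():
--         if count > maximum:
--             maximum = count
--             most_frequent = value
--     return values_y, most_frequent
-- ===== SOURCE B (Python) =====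
-- def most_common_y(D):
--     # One pass: count labels and keep the current best (max count, smallest
--     # label among ties) online, instead of counting then sorting the keys.
--     counts = {}
--     maximum = 0
--     most_frequent = None
--     for d in D:
--         y = d[-1]
--         c = counts.get(y, 0) + 1
--         counts[y] = c
--         if c > maximum:
--             maximum = c
--             most_frequent = y
--         elif c == maximum and y < most_frequent:
--             most_frequent = y
--     return counts, most_frequent
-- ===== Notes on version B (the rewrite author's own statement) =====
-- stated objective: alternative
-- what changed: B selects the most frequent label online during the single counting pass (strictly-greater count, or equal count with a smaller label, updates the best), eliminating A's key sort and the second dict rebuild/scan.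
-- outside the precondition, e.g. on most_common_y([[]]): A raises IndexError, B raises IndexError
import Mathlib
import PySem

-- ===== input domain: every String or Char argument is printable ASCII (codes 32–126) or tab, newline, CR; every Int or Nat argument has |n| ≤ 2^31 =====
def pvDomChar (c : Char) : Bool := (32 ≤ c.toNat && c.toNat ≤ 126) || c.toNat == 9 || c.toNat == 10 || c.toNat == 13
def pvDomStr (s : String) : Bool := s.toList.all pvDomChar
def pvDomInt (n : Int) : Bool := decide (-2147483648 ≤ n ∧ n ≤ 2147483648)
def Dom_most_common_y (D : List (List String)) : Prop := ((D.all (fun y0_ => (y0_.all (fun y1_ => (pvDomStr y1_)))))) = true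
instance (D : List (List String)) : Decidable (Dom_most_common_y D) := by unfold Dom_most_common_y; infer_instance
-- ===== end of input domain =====

-- B replaces A's count-then-sort-then-rescan selection by a single counting pass that
-- keeps the best (max count, smallest label on ties) online (objective: alternative).


-- ===== PORT A =====
-- loop body of A's counting loop: current_y = d[-1]; if absent insert 0; then += 1
-- (d[-1] is total here via default "": Pre_ rules out empty rows, where Python raises IndexError)
def pvStepA (vy : PySem.Dict String Int) (d : List String) : PySem.Dict String Int :=
  let current_y := PySem.List.pyGetD d (-1) ""
  let vy := if vy.contains current_y then vy else vy.insert current_y 0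
  vy.insert current_y (vy.getD current_y 0 + 1)

def most_common_y (D : List (List String)) : (List (String × Int)) × Option String :=
  let values_y := D.foldl pvStepA PySem.Dict.empty
  let y_keys := PySem.List.sorted values_y.keys (fun k => k) false
  let sorted_dict := y_keys.foldl (fun sd i => sd.insert i (values_y.getD i 0)) PySem.Dict.empty
  let mm := sorted_dict.items.foldl
    (fun (acc : Int × Option String) vc => if vc.2 > acc.1 then (vc.2, some vc.1) else acc)
    (0, (none : Option String))
  (values_y.items, mm.2)

-- ===== PORT B =====
-- loop body of B's single pass: count y and update the running (maximum, most_frequent)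
-- (the `none` arm of the tie test is unreachable in Python: c == maximum ≥ 1 forces most_frequent ≠ None)
def pvStepB (st : PySem.Dict String Int × Int × Option String) (d : List String) :
    PySem.Dict String Int × Int × Option String :=
  let y := PySem.List.pyGetD d (-1) ""
  let c := st.1.getD y 0 + 1
  let counts := st.1.insert y c
  if c > st.2.1 then (counts, c, some y)
  else if c == st.2.1 && (match st.2.2 with | some mf => decide (y < mf) | none => false) then
    (counts, st.2.1, some y)
  else (counts, st.2.1, st.2.2)

def most_common_y_alt (D : List (List String)) : (List (String × Int)) × Option String :=
  let st := D.foldl pvStepB (PySem.Dict.empty, 0, none)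
  (st.1.items, st.2.2)

-- ===== PRECONDITION & SPEC =====
-- Pre_ excludes exactly the inputs with an empty row, where Python A raises IndexError on d[-1].
def Pre_most_common_y (D : List (List String)) : Prop := ∀ d ∈ D, d ≠ []
instance (D : List (List String)) : Decidable (Pre_most_common_y D) := by
  unfold Pre_most_common_y; infer_instance

def pvWitness_most_common_y : List (List String) := [["a", "yes"], ["b", "no"], ["c", "yes"]]

def Spec_most_common_y (D : List (List String)) (out : (List (String × Int)) × Option String) : Prop := out = most_common_y_alt D
instance (D : List (List String)) (out : (List (String × Int)) × Option String) : Decidable (Spec_most_common_y D out) := by unfold Spec_most_common_y; infer_instance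

-- ===== CLAIM (what is proved, stated in full; the proofs are below) =====
def Claim_equal_most_common_y : Prop := ∀ (D : List (List String)), Dom_most_common_y D → Pre_most_common_y D → Spec_most_common_y D (most_common_y D)

-- ===== LEMMAS AND PROOFS =====

-- the maximal count of a counting dict (0 when empty)
theorem pvFmax_le (l : List String) (g : String → Int) (a : Int) :
    a ≤ l.foldl (fun x k => max x (g k)) a := by
  induction l generalizing a with
  | nil => simp
  | cons h t ih => exact le_trans (le_max_left a (g h)) (ih _)

theorem pvFmax_mem_le (l : List String) (g : String → Int) (a : Int) :
    ∀ k ∈ l, g k ≤ l.foldl (fun x k => max x (g k)) a := by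
  induction l generalizing a with
  | nil => simp
  | cons h t ih =>
    intro k hk
    rcases List.mem_cons.mp hk with rfl | hk
    · exact le_trans (le_max_right a (g k)) (pvFmax_le t g _)
    · exact ih _ k hk

theorem pvFmax_eq_or (l : List String) (g : String → Int) (a : Int) :
    l.foldl (fun x k => max x (g k)) a = a ∨ ∃ k ∈ l, l.foldl (fun x k => max x (g k)) a = g k := by
  induction l generalizing a with
  | nil => simp
  | cons h t ih =>
    rcases ih (max a (g h)) with heq | ⟨k, hk, hkeq⟩
    · simp only [List.foldl_cons]
      rcases max_cases a (g h) with ⟨hm, _⟩ | ⟨hm, _⟩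
      · left; rw [heq, hm]
      · right; exact ⟨h, List.mem_cons_self, by rw [heq, hm]⟩
    · right; exact ⟨k, List.mem_cons_of_mem _ hk, hkeq⟩

theorem pvScan_char (ks : List String) (f : String → Int) (m0 : Int) (s0 : Option String) :
    (ks.map (fun k => (k, f k))).foldl
      (fun (acc : Int × Option String) vc => if vc.2 > acc.1 then (vc.2, some vc.1) else acc) (m0, s0)
    = (ks.foldl (fun a k => max a (f k)) m0,
       if m0 < ks.foldl (fun a k => max a (f k)) m0 then
         (ks.filter (fun k => f k = ks.foldl (fun a k => max a (f k)) m0)).head?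
       else s0) := by
  induction ks generalizing m0 s0 with
  | nil => simp
  | cons h t ih =>
    simp only [List.map_cons, List.foldl_cons]
    by_cases hgt : f h > m0
    · rw [if_pos hgt, ih]
      have hmax : max m0 (f h) = f h := max_eq_right (le_of_lt hgt)
      simp only [hmax]
      by_cases h2 : f h < t.foldl (fun a k => max a (f k)) (f h)
      · rw [if_pos h2, if_pos (lt_of_lt_of_le hgt (le_of_lt h2))]
        rw [List.filter_cons_of_neg (by simp; omega)]
      · rw [if_neg h2]
        have hM : t.foldl (fun a k => max a (f k)) (f h) = f h :=
          le_antisymm (not_lt.mp h2) (pvFmax_le t f _)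
        rw [if_pos (by omega)]
        rw [List.filter_cons_of_pos (by simp [hM])]
        simp
    · rw [if_neg hgt, ih]
      have hmax : max m0 (f h) = m0 := max_eq_left (not_lt.mp hgt)
      simp only [hmax]
      by_cases h2 : m0 < t.foldl (fun a k => max a (f k)) m0
      · rw [if_pos h2, if_pos h2]
        rw [List.filter_cons_of_neg (by simp; omega)]
      · rw [if_neg h2, if_neg h2]

theorem pvHead_pairwise_min (l : List String) (h : l.Pairwise (· ≤ ·)) : l.head? = l.min? := by
  cases l with
  | nil => simp
  | cons a t =>
    have hall : ∀ x ∈ t, a ≤ x := fun x hx => (List.pairwise_cons.mp h).1 x hx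
    have : (a :: t).min? = some a := by
      rw [List.min?_eq_some_iff]
      exact ⟨List.mem_cons_self, fun b hb => by
        rcases List.mem_cons.mp hb with rfl | hb
        · exact le_refl _
        · exact hall b hb⟩
    simp [this]

theorem pvMin_perm (l l' : List String) (h : l.Perm l') : l.min? = l'.min? := by
  cases hl : l.min? with
  | none =>
    rw [List.min?_eq_none_iff] at hl
    subst hl
    rw [← h.nil_eq]
    simp
  | some a =>
    rw [List.min?_eq_some_iff] at hl
    symm
    rw [List.min?_eq_some_iff]
    exact ⟨h.mem_iff.mp hl.1, fun b hb => hl.2 b (h.mem_iff.mpr hb)⟩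

theorem pvHead_sorted_filter (ks : List String) (p : String → Bool) :
    ((PySem.List.sorted ks (fun k => k) false).filter p).head? = (ks.filter p).min? := by
  have hpw : (PySem.List.sorted ks (fun k => k) false).Pairwise (· ≤ ·) := by
    have := PySem.List.sorted_pairwise ks (fun k => k)
    simpa using this
  have h1 := pvHead_pairwise_min _ (hpw.filter p)
  rw [h1]
  exact pvMin_perm _ _ ((PySem.List.sorted_perm ks (fun k => k) false).filter p)

def pvMx (vy : PySem.Dict String Int) : Int :=
  vy.keys.foldl (fun a k => max a (vy.getD k 0)) 0
def pvMF (vy : PySem.Dict String Int) : Option String :=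
  (vy.keys.filter (fun k => vy.getD k 0 = pvMx vy)).min?

theorem pvMx_le (vy : PySem.Dict String Int) (k : String) (hk : k ∈ vy.keys) :
    vy.getD k 0 ≤ pvMx vy := pvFmax_mem_le _ _ 0 k hk

theorem pvMx_nonneg (vy : PySem.Dict String Int) : 0 ≤ pvMx vy := pvFmax_le _ _ 0

theorem pvGetD_nonneg (vy : PySem.Dict String Int)
    (hpos : ∀ k ∈ vy.keys, 1 ≤ vy.getD k 0) (y : String) : 0 ≤ vy.getD y 0 := by
  by_cases h : vy.contains y
  · exact le_trans (by omega) (hpos y ((PySem.Dict.contains_iff_mem_keys vy y).mp h))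
  · rw [PySem.Dict.getD_of_not_contains _ _ (by simpa using h)]

-- pvMx of the bumped dict is max (pvMx vy) c
theorem pvMx_insert (vy : PySem.Dict String Int) (y : String) :
    pvMx (vy.insert y (vy.getD y 0 + 1)) = max (pvMx vy) (vy.getD y 0 + 1) := by
  set c := vy.getD y 0 + 1 with hc
  set vy' := vy.insert y c with hvy'
  have hmem : ∀ k, k ∈ vy'.keys ↔ k = y ∨ k ∈ vy.keys := fun k => PySem.Dict.mem_keys_insert vy y k c
  have hget : ∀ k, vy'.getD k 0 = if k = y then c else vy.getD k 0 := fun k =>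
    PySem.Dict.getD_insert vy y k c 0
  apply le_antisymm
  · rcases pvFmax_eq_or vy'.keys (fun k => vy'.getD k 0) 0 with h0 | ⟨k, hk, hkeq⟩
    · exact le_trans (le_of_eq h0) (le_max_of_le_left (pvMx_nonneg vy))
    · show vy'.keys.foldl _ 0 ≤ _
      rw [hkeq, hget k]
      split_ifs with hky
      · exact le_max_right _ _
      · refine le_max_of_le_left (pvMx_le vy k ?_)
        rcases (hmem k).mp hk with h | h
        · exact absurd h hky
        · exact h
  · apply max_le
    · rcases pvFmax_eq_or vy.keys (fun k => vy.getD k 0) 0 with h0 | ⟨k, hk, hkeq⟩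
      · exact le_trans (le_of_eq h0) (pvMx_nonneg vy')
      · show vy.keys.foldl _ 0 ≤ _
        rw [hkeq]
        by_cases hky : k = y
        · subst hky
          calc vy.getD k 0 ≤ c := by omega
            _ = vy'.getD k 0 := by rw [hget k]; simp
            _ ≤ pvMx vy' := pvMx_le vy' k ((hmem k).mpr (Or.inl rfl))
        · calc vy.getD k 0 = vy'.getD k 0 := by rw [hget k, if_neg hky]
            _ ≤ pvMx vy' := pvMx_le vy' k ((hmem k).mpr (Or.inr hk))
    · calc c = vy'.getD y 0 := (PySem.Dict.getD_insert_self vy y c 0).symm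
        _ ≤ pvMx vy' := pvMx_le vy' y ((hmem y).mpr (Or.inl rfl))

theorem pvMF_some (vy : PySem.Dict String Int) (h : 1 ≤ pvMx vy) :
    ∃ m0, pvMF vy = some m0 ∧ m0 ∈ vy.keys ∧ vy.getD m0 0 = pvMx vy ∧
      ∀ b ∈ vy.keys, vy.getD b 0 = pvMx vy → m0 ≤ b := by
  rcases pvFmax_eq_or vy.keys (fun k => vy.getD k 0) 0 with h0 | ⟨k0, hk0, hkeq⟩
  · exfalso
    have h0' : pvMx vy = 0 := h0
    omega
  · have hk0f : k0 ∈ vy.keys.filter (fun k => vy.getD k 0 = pvMx vy) :=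
      List.mem_filter.mpr ⟨hk0, by simp [hkeq.symm]; rfl⟩
    cases hmf : pvMF vy with
    | none =>
      unfold pvMF at hmf
      rw [List.min?_eq_none_iff] at hmf
      rw [hmf] at hk0f
      exact absurd hk0f (List.not_mem_nil)
    | some m0 =>
      have := hmf
      unfold pvMF at this
      rw [List.min?_eq_some_iff] at this
      obtain ⟨hm, hlb⟩ := this
      obtain ⟨hmk, hmv⟩ := List.mem_filter.mp hm
      exact ⟨m0, rfl, hmk, by simpa using hmv,
        fun b hb hbv => hlb b (List.mem_filter.mpr ⟨hb, by simp [hbv]⟩)⟩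

theorem pvUpdate (vy : PySem.Dict String Int) (y : String)
    (hpos : ∀ k ∈ vy.keys, 1 ≤ vy.getD k 0) :
    (pvMx (vy.insert y (vy.getD y 0 + 1)), pvMF (vy.insert y (vy.getD y 0 + 1)))
    = (if vy.getD y 0 + 1 > pvMx vy then ((vy.getD y 0 + 1), some y)
       else if (vy.getD y 0 + 1) == pvMx vy
              && (match pvMF vy with | some mf => decide (y < mf) | none => false) then
         (pvMx vy, some y)
       else (pvMx vy, pvMF vy)) := by
  have hc0 : 0 ≤ vy.getD y 0 := pvGetD_nonneg vy hpos y
  set c := vy.getD y 0 + 1 with hc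
  set vy' := vy.insert y c with hvy'
  have hmem : ∀ k, k ∈ vy'.keys ↔ k = y ∨ k ∈ vy.keys := fun k => PySem.Dict.mem_keys_insert vy y k c
  have hget : ∀ k, vy'.getD k 0 = if k = y then c else vy.getD k 0 := fun k =>
    PySem.Dict.getD_insert vy y k c 0
  have hgy : vy'.getD y 0 = c := by rw [hget y]; simp
  have hM' : pvMx vy' = max (pvMx vy) c := pvMx_insert vy y
  have hfilt : ∀ b, b ∈ vy'.keys.filter (fun k => vy'.getD k 0 = pvMx vy') ↔
      (b ∈ vy'.keys ∧ vy'.getD b 0 = pvMx vy') := by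
    intro b; rw [List.mem_filter]; simp
  by_cases h1 : c > pvMx vy
  · -- new strict maximum: the best becomes (c, y)
    rw [if_pos h1]
    have hM : pvMx vy' = c := by rw [hM']; exact max_eq_right (le_of_lt h1)
    refine Prod.ext_iff.mpr ⟨hM, ?_⟩
    show pvMF vy' = some y
    unfold pvMF
    rw [List.min?_eq_some_iff]
    constructor
    · exact List.mem_filter.mpr ⟨(hmem y).mpr (Or.inl rfl), by simp [hgy, hM]⟩
    · intro b hb
      obtain ⟨hbk, hbv⟩ := (hfilt b).mp (by simpa using hb)
      by_cases hby : b = y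
      · subst hby; exact le_refl b
      · exfalso
        rcases (hmem b).mp hbk with h | hbm
        · exact hby h
        · rw [hget b, if_neg hby] at hbv
          have := pvMx_le vy b hbm
          rw [hM] at hbv
          omega
  · rw [if_neg h1]
    have hM : pvMx vy' = pvMx vy := by rw [hM']; exact max_eq_left (by omega)
    have hMpos : 1 ≤ pvMx vy := by
      have : c ≤ pvMx vy := by omega
      omega
    obtain ⟨m0, hmf, hm0k, hm0v, hm0lb⟩ := pvMF_some vy hMpos
    rw [hmf]
    have hm0y : m0 ≠ y := by
      intro h; subst h
      have : c = pvMx vy + 1 := by rw [hc, hm0v]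
      omega
    by_cases h2 : c = pvMx vy
    · -- ties the maximum: y joins the argmax set
      have hcond : ((c == pvMx vy) && (match (some m0 : Option String) with
          | some mf => decide (y < mf) | none => false)) = decide (y < m0) := by
        simp [h2]
      rw [hcond]
      by_cases h3 : y < m0
      · rw [if_pos (by simpa using h3)]
        refine Prod.ext_iff.mpr ⟨hM, ?_⟩
        show pvMF vy' = some y
        unfold pvMF
        rw [List.min?_eq_some_iff]
        constructor
        · exact List.mem_filter.mpr ⟨(hmem y).mpr (Or.inl rfl), by simp [hgy, hM, h2]⟩
        · intro b hb
          obtain ⟨hbk, hbv⟩ := (hfilt b).mp (by simpa using hb)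
          rcases (hmem b).mp hbk with rfl | hbm
          · exact le_refl b
          · by_cases hby : b = y
            · subst hby; exact le_refl b
            · rw [hget b, if_neg hby, hM] at hbv
              exact le_of_lt (lt_of_lt_of_le h3 (hm0lb b hbm hbv))
      · rw [if_neg (by simpa using h3)]
        refine Prod.ext_iff.mpr ⟨hM, ?_⟩
        show pvMF vy' = some m0
        unfold pvMF
        rw [List.min?_eq_some_iff]
        constructor
        · refine List.mem_filter.mpr ⟨(hmem m0).mpr (Or.inr hm0k), ?_⟩
          rw [hget m0, if_neg hm0y, hM]
          simp [hm0v]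
        · intro b hb
          obtain ⟨hbk, hbv⟩ := (hfilt b).mp (by simpa using hb)
          by_cases hby : b = y
          · subst hby; exact le_of_not_gt (by simpa using h3)
          · rcases (hmem b).mp hbk with h | hbm
            · exact absurd h hby
            · rw [hget b, if_neg hby, hM] at hbv
              exact hm0lb b hbm hbv
    · -- c below the maximum: nothing changes
      have hcond : ((c == pvMx vy) && (match (some m0 : Option String) with
          | some mf => decide (y < mf) | none => false)) = false := by
        simp [h2]
      rw [hcond, if_neg (by simp)]
      refine Prod.ext_iff.mpr ⟨hM, ?_⟩
      show pvMF vy' = some m0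
      unfold pvMF
      rw [List.min?_eq_some_iff]
      constructor
      · refine List.mem_filter.mpr ⟨(hmem m0).mpr (Or.inr hm0k), ?_⟩
        rw [hget m0, if_neg hm0y, hM]
        simp [hm0v]
      · intro b hb
        obtain ⟨hbk, hbv⟩ := (hfilt b).mp (by simpa using hb)
        by_cases hby : b = y
        · exfalso
          subst hby
          rw [hgy, hM] at hbv
          omega
        · rcases (hmem b).mp hbk with h | hbm
          · exact absurd h hby
          · rw [hget b, if_neg hby, hM] at hbv
            exact hm0lb b hbm hbv

theorem pvFmax_perm (l l' : List String) (g : String → Int) (h : l.Perm l') (a : Int) :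
    l.foldl (fun x k => max x (g k)) a = l'.foldl (fun x k => max x (g k)) a := by
  have : RightCommutative (fun (x : Int) (k : String) => max x (g k)) :=
    ⟨fun b x y => max_right_comm b (g x) (g y)⟩
  exact h.foldl_eq a

theorem pvPhase2 (vy : PySem.Dict String Int) (hnd : vy.keys.Nodup)
    (hpos : ∀ k ∈ vy.keys, 1 ≤ vy.getD k 0) :
    ((PySem.List.sorted vy.keys (fun k => k) false).foldl
        (fun sd i => sd.insert i (vy.getD i 0)) PySem.Dict.empty).items.foldl
      (fun (acc : Int × Option String) vc => if vc.2 > acc.1 then (vc.2, some vc.1) else acc)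
      (0, (none : Option String))
    = (pvMx vy, pvMF vy) := by
  have hperm := PySem.List.sorted_perm vy.keys (fun k => k) false
  have hnds : (PySem.List.sorted vy.keys (fun k => k) false).Nodup := hperm.nodup_iff.mpr hnd
  have hitems : ((PySem.List.sorted vy.keys (fun k => k) false).foldl
      (fun sd i => sd.insert i (vy.getD i 0)) PySem.Dict.empty).items
      = (PySem.List.sorted vy.keys (fun k => k) false).map (fun k => (k, vy.getD k 0)) := by
    have := PySem.Dict.items_foldl_insert_fresh (PySem.List.sorted vy.keys (fun k => k) false)
      (fun k => k) (fun k => vy.getD k 0) PySem.Dict.empty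
      (fun a _ => PySem.Dict.contains_empty a) (by simpa using hnds)
    simpa using this
  rw [hitems, pvScan_char]
  have hMeq : (PySem.List.sorted vy.keys (fun k => k) false).foldl
      (fun a k => max a (vy.getD k 0)) 0 = pvMx vy :=
    pvFmax_perm _ _ _ hperm 0
  simp only [hMeq]
  rw [pvHead_sorted_filter]
  cases hk : vy.keys with
  | nil =>
    have : pvMx vy = 0 := by simp [pvMx, hk]
    rw [if_neg (by omega)]
    simp [pvMF, hk]
  | cons k0 t =>
    have h1 : 1 ≤ vy.getD k0 0 := hpos k0 (by simp [hk])
    have h2 : vy.getD k0 0 ≤ pvMx vy := by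
      have := pvFmax_mem_le vy.keys (fun k => vy.getD k 0) 0 k0 (by simp [hk])
      simpa [pvMx] using this
    rw [if_pos (by omega)]
    simp [pvMF, hk]

-- A's counting-loop body in insert form
theorem pvStepA_eq (vy : PySem.Dict String Int) (d : List String) :
    pvStepA vy d = vy.insert (PySem.List.pyGetD d (-1) "")
      (vy.getD (PySem.List.pyGetD d (-1) "") 0 + 1) := by
  unfold pvStepA
  set y := PySem.List.pyGetD d (-1) ""
  by_cases h : vy.contains y
  · simp [h]
  · simp only [h, if_false, Bool.false_eq_true]
    rw [PySem.Dict.getD_insert_self, PySem.Dict.insert_insert_self,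
        PySem.Dict.getD_of_not_contains _ _ (by simpa using h)]

-- B's loop body, with the triple written as (dict, pair)
theorem pvStepB_eq (vy : PySem.Dict String Int) (m : Int) (mf : Option String) (d : List String) :
    pvStepB (vy, m, mf) d
    = (vy.insert (PySem.List.pyGetD d (-1) "") (vy.getD (PySem.List.pyGetD d (-1) "") 0 + 1),
       if vy.getD (PySem.List.pyGetD d (-1) "") 0 + 1 > m then
         (vy.getD (PySem.List.pyGetD d (-1) "") 0 + 1, some (PySem.List.pyGetD d (-1) ""))
       else if (vy.getD (PySem.List.pyGetD d (-1) "") 0 + 1) == m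
              && (match mf with | some x => decide (PySem.List.pyGetD d (-1) "" < x) | none => false) then
         (m, some (PySem.List.pyGetD d (-1) ""))
       else (m, mf)) := by
  unfold pvStepB
  dsimp only
  split_ifs <;> rfl

theorem pvLoop (D : List (List String)) :
    ∀ (vy : PySem.Dict String Int),
      vy.keys.Nodup → (∀ k ∈ vy.keys, 1 ≤ vy.getD k 0) →
      D.foldl pvStepB (vy, pvMx vy, pvMF vy)
        = (D.foldl pvStepA vy, pvMx (D.foldl pvStepA vy), pvMF (D.foldl pvStepA vy))
      ∧ (D.foldl pvStepA vy).keys.Nodup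
      ∧ (∀ k ∈ (D.foldl pvStepA vy).keys, 1 ≤ (D.foldl pvStepA vy).getD k 0) := by
  induction D with
  | nil => exact fun vy hnd hpos => ⟨rfl, hnd, hpos⟩
  | cons d t ih =>
    intro vy hnd hpos
    simp only [List.foldl_cons]
    set y := PySem.List.pyGetD d (-1) "" with hy
    have hstep : pvStepB (vy, pvMx vy, pvMF vy) d
        = (pvStepA vy d, pvMx (pvStepA vy d), pvMF (pvStepA vy d)) := by
      rw [pvStepB_eq, pvStepA_eq, ← pvUpdate vy y hpos]
    rw [hstep]
    have hnd' : (pvStepA vy d).keys.Nodup := by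
      rw [pvStepA_eq]; exact PySem.Dict.nodup_keys_insert _ _ _ hnd
    have hpos' : ∀ k ∈ (pvStepA vy d).keys, 1 ≤ (pvStepA vy d).getD k 0 := by
      intro k hk
      rw [pvStepA_eq] at hk ⊢
      rw [PySem.Dict.getD_insert]
      by_cases hky : k = y
      · rw [if_pos hky]
        have := pvGetD_nonneg vy hpos (PySem.List.pyGetD d (-1) "")
        omega
      · rw [if_neg hky]
        refine hpos k ?_
        rcases PySem.Dict.mem_keys_insert vy y k _ |>.mp hk with h | h
        · exact absurd h hky
        · exact h
    exact ih (pvStepA vy d) hnd' hpos'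

-- ===== VERDICT (by name: the statement is the Claim_ definition above) =====
theorem most_common_y_spec : Claim_equal_most_common_y := by
  intro D _ _
  unfold Spec_most_common_y most_common_y most_common_y_alt
  have hbase1 : pvMx PySem.Dict.empty = 0 := by
    unfold pvMx; rw [PySem.Dict.keys_empty]; rfl
  have hbase2 : pvMF PySem.Dict.empty = none := by
    unfold pvMF; rw [PySem.Dict.keys_empty]; rfl
  obtain ⟨hB, hnd, hpos⟩ := pvLoop D PySem.Dict.empty PySem.Dict.nodup_keys_empty (by simp [PySem.Dict.keys_empty])
  rw [hbase1, hbase2] at hB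
  dsimp only
  rw [hB, pvPhase2 (D.foldl pvStepA PySem.Dict.empty) hnd hpos]
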